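-- pv_equiv track=rewrite | github.com/yuriyuka/BadouNLP | yanshun/week04/homework4.py | all_cut1
-- ===== SOURCE A (Python) =====
-- def all_cut1(sentence, Dict):
--     dp = [[] for i in range(len(sentence)+1)]
--     dp[len(sentence)] = [[]]
--     for i in range(len(sentence)-1,-1,-1):
--         for j in range(len(sentence),i,-1):
--             if sentence[i:j] in Dict.keys():
--                 for k in range(len(dp[j])):
--                     dp[i].append([sentence[i:j]] + dp[j][k])
--     target = dp[0]
--
--     return target
-- ===== SOURCE B (Python) =====
-- def all_cut1(sentence, Dict):
--     n = len(sentence)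
--     memo = {}
--
--     def cut(i):
--         if i in memo:
--             return memo[i]
--         if i < n:
--             res = []
--             for j in range(n, i, -1):
--                 word = sentence[i:j]
--                 if word in Dict:
--                     for tail in cut(j):
--                         res.append([word] + tail)
--         else:
--             res = [[]]
--         memo[i] = res
--         return res
--
--     return cut(0)
-- ===== Notes on version B (the rewrite author's own statement) =====
-- stated objective: faster
-- what changed: Replaces A's bottom-up dp table filled by two explicit index loops over every (i,j) pair with a memoized top-down recursion cut(i) over suffixes, producing segmentations in the same order.
import Mathlib
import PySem

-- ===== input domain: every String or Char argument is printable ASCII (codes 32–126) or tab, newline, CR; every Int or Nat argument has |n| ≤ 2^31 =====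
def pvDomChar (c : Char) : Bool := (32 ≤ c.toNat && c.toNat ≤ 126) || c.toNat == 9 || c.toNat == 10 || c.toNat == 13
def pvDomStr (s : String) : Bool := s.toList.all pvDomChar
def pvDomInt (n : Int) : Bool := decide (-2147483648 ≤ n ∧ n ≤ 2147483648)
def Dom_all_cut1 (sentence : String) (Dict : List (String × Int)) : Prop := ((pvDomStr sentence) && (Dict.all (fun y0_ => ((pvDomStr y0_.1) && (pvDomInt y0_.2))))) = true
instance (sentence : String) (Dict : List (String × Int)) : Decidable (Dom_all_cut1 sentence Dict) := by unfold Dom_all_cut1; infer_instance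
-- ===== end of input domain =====

-- B replaces A's bottom-up dp table filled by index loops over every (i,j) pair with a
-- memoized top-down recursion cut(i) that only explores reachable suffixes (objective:
-- faster, measured; same output order).

-- Shared helper for the loop bounds: range(n, i, -1) = [n, n-1, …, i+1].
def pvDescRange (n i : Nat) : List Nat := (List.range' (i+1) (n - i)).reverse

theorem pvDescRange_mem {n i j : Nat} (h : j ∈ pvDescRange n i) : i < j ∧ j ≤ n := by
  simp only [pvDescRange, List.mem_reverse, List.mem_range'] at h
  obtain ⟨k, hk, rfl⟩ := h
  omega

-- ===== PORT A =====
-- inner loop: for j in range(len(sentence), i, -1): … (appending into dp[i], which starts as dp.getD i []);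
-- sentence[i:j] for 0 ≤ i ≤ j is exactly (toList.drop i).take (j - i)
def pvStepA (s : List Char) (keys : List String) (dp : List (List (List String))) (i : Nat) :
    List (List String) :=
  (pvDescRange s.length i).foldl
    (fun acc j =>
      let w := String.mk ((s.drop i).take (j - i))
      if keys.contains w then acc ++ (dp.getD j []).map (fun t => w :: t) else acc)
    (dp.getD i [])

-- outer loop: for i in range(len(sentence)-1, -1, -1): dp[i] = …
def pvLoopA (s : List Char) (keys : List String) :
    Nat → List (List (List String)) → List (List (List String))
  | 0, dp => dp
  | i+1, dp => pvLoopA s keys i (dp.set i (pvStepA s keys dp i))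

def all_cut1 (sentence : String) (Dict : List (String × Int)) : List (List String) :=
  let s := sentence.toList
  let n := s.length
  let dp0 := ((List.range (n+1)).map (fun _ => ([] : List (List String)))).set n [[]]
  let dp := pvLoopA s (Dict.map Prod.fst) n dp0
  dp.getD 0 []

-- ===== PORT B =====
-- cut(i) with the memo dict threaded through; recursion on the suffix length
def pvCutM (s : List Char) (keys : List String) (i : Nat)
    (memo : PySem.Dict Nat (List (List String))) :
    List (List String) × PySem.Dict Nat (List (List String)) :=
  match memo.get? i with
  | some v => (v, memo)
  | none =>
    if hin : i < s.length then
      let r := (pvDescRange s.length i).attach.foldl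
        (fun (p : List (List String) × PySem.Dict Nat (List (List String))) jh =>
          let w := String.mk ((s.drop i).take (jh.1 - i))
          if keys.contains w then
            let q := pvCutM s keys jh.1 p.2
            (p.1 ++ q.1.map (fun t => w :: t), q.2)
          else p)
        ([], memo)
      (r.1, r.2.insert i r.1)
    else ([[]], memo.insert i [[]])
termination_by s.length - i
decreasing_by
  have := pvDescRange_mem jh.2
  omega

def all_cut1_alt (sentence : String) (Dict : List (String × Int)) : List (List String) :=
  (pvCutM sentence.toList (Dict.map Prod.fst) 0 PySem.Dict.empty).1

-- ===== PRECONDITION & SPEC =====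
def Spec_all_cut1 (sentence : String) (Dict : List (String × Int)) (out : List (List String)) : Prop := out = all_cut1_alt sentence Dict
instance (sentence : String) (Dict : List (String × Int)) (out : List (List String)) : Decidable (Spec_all_cut1 sentence Dict out) := by unfold Spec_all_cut1; infer_instance

-- ===== CLAIM (what is proved, stated in full; the proofs are below) =====
def Claim_equal_all_cut1 : Prop := ∀ (sentence : String) (Dict : List (String × Int)), Dom_all_cut1 sentence Dict → Spec_all_cut1 sentence Dict (all_cut1 sentence Dict)

-- ===== LEMMAS AND PROOFS =====

-- Proof-side reference function: the memo-free recursion cut(i).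
def pvCut (s : List Char) (keys : List String) (i : Nat) : List (List String) :=
  if hin : i < s.length then
    (pvDescRange s.length i).attach.foldl
      (fun acc jh =>
        let w := String.mk ((s.drop i).take (jh.1 - i))
        if keys.contains w then acc ++ (pvCut s keys jh.1).map (fun t => w :: t) else acc)
      []
  else [[]]
termination_by s.length - i
decreasing_by
  have := pvDescRange_mem jh.2
  omega

-- A memo dict is good if every entry is the reference value.
def pvGood (s : List Char) (keys : List String)
    (m : PySem.Dict Nat (List (List String))) : Prop :=
  ∀ j v, m.get? j = some v → v = pvCut s keys j

theorem pvGood_insert {s : List Char} {keys : List String}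
    {m : PySem.Dict Nat (List (List String))} (hG : pvGood s keys m)
    {i : Nat} {v : List (List String)} (hv : v = pvCut s keys i) :
    pvGood s keys (m.insert i v) := by
  intro j w hw
  rw [PySem.Dict.get?_insert] at hw
  split at hw
  · cases hw; subst ‹j = i›; exact hv
  · exact hG j w hw

theorem pvCutM_spec (s : List Char) (keys : List String) :
    ∀ k i, s.length - i ≤ k →
      ∀ m, pvGood s keys m →
        (pvCutM s keys i m).1 = pvCut s keys i ∧ pvGood s keys (pvCutM s keys i m).2 := by
  intro k
  induction k with
  | zero =>
    intro i hk m hG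
    have hin : ¬ i < s.length := by omega
    rw [pvCutM]
    cases hmem : m.get? i with
    | some v => exact ⟨hG i v hmem, hG⟩
    | none =>
      simp only [dif_neg hin]
      refine ⟨?_, pvGood_insert hG ?_⟩ <;> rw [pvCut, dif_neg hin]
  | succ k ih =>
    intro i hk m hG
    rw [pvCutM]
    cases hmem : m.get? i with
    | some v => exact ⟨hG i v hmem, hG⟩
    | none =>
      by_cases hin : i < s.length
      · simp only [dif_pos hin]
        -- the inner fold: accumulator matches the reference fold, memo stays good
        have hfold : ∀ (l : List {x // x ∈ pvDescRange s.length i})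
            (a : List (List String)) (m' : PySem.Dict Nat (List (List String))),
            pvGood s keys m' →
            (l.foldl
              (fun (p : List (List String) × PySem.Dict Nat (List (List String))) jh =>
                let w := String.mk ((s.drop i).take (jh.1 - i))
                if keys.contains w then
                  let q := pvCutM s keys jh.1 p.2
                  (p.1 ++ q.1.map (fun t => w :: t), q.2)
                else p)
              (a, m')).1 =
            l.foldl
              (fun acc jh =>
                let w := String.mk ((s.drop i).take (jh.1 - i))
                if keys.contains w then acc ++ (pvCut s keys jh.1).map (fun t => w :: t) else acc)
              a ∧
            pvGood s keys
            (l.foldl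
              (fun (p : List (List String) × PySem.Dict Nat (List (List String))) jh =>
                let w := String.mk ((s.drop i).take (jh.1 - i))
                if keys.contains w then
                  let q := pvCutM s keys jh.1 p.2
                  (p.1 ++ q.1.map (fun t => w :: t), q.2)
                else p)
              (a, m')).2 := by
          intro l
          induction l with
          | nil => intro a m' hG'; exact ⟨rfl, hG'⟩
          | cons jh tl ihl =>
            intro a m' hG'
            have hj := pvDescRange_mem jh.2
            simp only [List.foldl_cons]
            by_cases hc : keys.contains (String.mk ((s.drop i).take (jh.1 - i)))
            · simp only [hc, if_pos]
              have hrec := ih jh.1 (by omega) m' hG'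
              obtain ⟨h1, h2⟩ := hrec
              rw [h1]
              exact ihl _ _ h2
            · simp only [hc, if_neg, if_false]
              exact ihl a m' hG'
        have h := hfold (pvDescRange s.length i).attach [] m hG
        refine ⟨?_, pvGood_insert h.2 ?_⟩ <;>
          rw [pvCut, dif_pos hin] <;> exact h.1
      · simp only [dif_neg hin]
        refine ⟨?_, pvGood_insert hG ?_⟩ <;> rw [pvCut, dif_neg hin]

-- B's port computes the reference recursion.
theorem all_cut1_alt_eq (sentence : String) (Dict : List (String × Int)) :
    all_cut1_alt sentence Dict = pvCut sentence.toList (Dict.map Prod.fst) 0 := by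
  have h := pvCutM_spec sentence.toList (Dict.map Prod.fst) sentence.toList.length 0
    (by omega) PySem.Dict.empty (by intro j v hv; simp [PySem.Dict.get?_empty] at hv)
  exact h.1

-- A's inner loop computes the reference recursion when dp already holds it above i.
theorem pvStepA_eq (s : List Char) (keys : List String) (dp : List (List (List String)))
    (i : Nat) (hi : i < s.length) (hdpi : dp.getD i [] = [])
    (hdp : ∀ j, i < j → j ≤ s.length → dp.getD j [] = pvCut s keys j) :
    pvStepA s keys dp i = pvCut s keys i := by
  rw [pvCut, dif_pos hi]
  rw [pvStepA, hdpi]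
  have key : ∀ (l : List {x // x ∈ pvDescRange s.length i}) (a : List (List String)),
      (l.map Subtype.val).foldl
        (fun acc j =>
          let w := String.mk ((s.drop i).take (j - i))
          if keys.contains w then acc ++ (dp.getD j []).map (fun t => w :: t) else acc) a =
      l.foldl
        (fun acc jh =>
          let w := String.mk ((s.drop i).take (jh.1 - i))
          if keys.contains w then acc ++ (pvCut s keys jh.1).map (fun t => w :: t) else acc) a := by
    intro l
    induction l with
    | nil => intro a; rfl
    | cons jh tl ihl =>
      intro a
      have hj := pvDescRange_mem jh.2
      simp only [List.map_cons, List.foldl_cons]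
      rw [hdp jh.1 hj.1 hj.2]
      exact ihl _
  calc (pvDescRange s.length i).foldl
        (fun acc j =>
          let w := String.mk ((s.drop i).take (j - i))
          if keys.contains w then acc ++ (dp.getD j []).map (fun t => w :: t) else acc) []
      = ((pvDescRange s.length i).attach.map Subtype.val).foldl
        (fun acc j =>
          let w := String.mk ((s.drop i).take (j - i))
          if keys.contains w then acc ++ (dp.getD j []).map (fun t => w :: t) else acc) [] := by
        rw [List.attach_map_subtype_val]
    _ = _ := key _ []

-- A's outer loop fills dp with the reference values from the right.
theorem pvLoopA_spec (s : List Char) (keys : List String) :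
    ∀ i dp, i ≤ s.length → dp.length = s.length + 1 →
      (∀ j, j ≤ s.length → (i ≤ j → dp.getD j [] = pvCut s keys j) ∧ (j < i → dp.getD j [] = [])) →
      ∀ j, j ≤ s.length → (pvLoopA s keys i dp).getD j [] = pvCut s keys j := by
  intro i
  induction i with
  | zero => intro dp _ _ h j hj; exact (h j hj).1 (Nat.zero_le j)
  | succ i ih =>
    intro dp hi hlen h
    have hilt : i < s.length := by omega
    have hidp : i < dp.length := by omega
    have hv : pvStepA s keys dp i = pvCut s keys i := by
      refine pvStepA_eq s keys dp i hilt ((h i (by omega)).2 (by omega)) ?_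
      intro j hij hjn
      exact (h j hjn).1 (by omega)
    refine ih (dp.set i (pvStepA s keys dp i)) (by omega) (by simp [hlen]) ?_
    intro j hj
    by_cases hji : j = i
    · subst hji
      constructor
      · intro _
        rw [List.getD_eq_getElem?_getD, List.getElem?_set_self hidp]
        exact hv
      · intro hc; omega
    · rw [List.getD_eq_getElem?_getD, List.getElem?_set_ne (by omega), ← List.getD_eq_getElem?_getD]
      constructor
      · intro hij; exact (h j hj).1 (by omega)
      · intro hij; exact (h j hj).2 (by omega)

-- ===== VERDICT (by name: the statement is the Claim_ definition above) =====
theorem all_cut1_spec : Claim_equal_all_cut1 := by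
  intro sentence Dict _
  unfold Spec_all_cut1
  rw [all_cut1_alt_eq]
  show (pvLoopA sentence.toList (Dict.map Prod.fst) sentence.toList.length
      (((List.range (sentence.toList.length+1)).map (fun _ => ([] : List (List String)))).set
        sentence.toList.length [[]])).getD 0 [] = _
  refine pvLoopA_spec sentence.toList (Dict.map Prod.fst) sentence.toList.length _
    (le_refl _) (by simp) ?_ 0 (Nat.zero_le _)
  intro j hj
  constructor
  · intro hnj
    have hjn : j = sentence.toList.length := by omega
    subst hjn
    rw [List.getD_eq_getElem?_getD, List.getElem?_set_self (by simp)]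
    rw [pvCut, dif_neg (by omega)]
    rfl
  · intro hjlt
    rw [List.getD_eq_getElem?_getD, List.getElem?_set_ne (by omega)]
    have hj1 : j < sentence.toList.length + 1 := by omega
    simp [List.getElem?_map, List.getElem?_range, hj1]
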